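-- pv_equiv track=rewrite | github.com/pypi-data/pypi-mirror-402 | packages/vgrid/vgrid-1.4.10-py3-none-any.whl/vgrid/dggs/digipin.py | digipin_children
-- ===== SOURCE A (Python) =====
-- from typing import Dict, Tuple, Union
--
-- def digipin_children(pin: str, target_resolution: int = None) -> Union[list, str]:
--     """
--     Get all child DIGIPIN codes by appending each possible character.
--     If target_resolution equals current resolution, returns itself.
--
--     Parameters
--     ----------
--     pin : str
--         DIGIPIN code (with or without dashes)
--     target_resolution : int, optional
--         Target resolution for children. If None, returns children at next level.
--
--     Returns
--     -------
--     list or str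
--         List of child DIGIPIN codes with dashes, or 'Invalid DIGIPIN' if the code is invalid
--
--     Examples
--     --------
--     >>> digipin_children('F3K')
--     ['F3K-F', 'F3K-C', 'F3K-9', 'F3K-8', 'F3K-J', 'F3K-3', 'F3K-2', 'F3K-7',
--      'F3K-K', 'F3K-4', 'F3K-5', 'F3K-6', 'F3K-L', 'F3K-M', 'F3K-P', 'F3K-T']
--     >>> digipin_children('F3K', 3)
--     ['F3K']
--     """
--     # Remove dashes
--     clean = pin.replace("-", "")
--
--     if len(clean) < 1:
--         return "Invalid DIGIPIN"
--
--     if target_resolution is None: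
--         target_resolution = len(clean) + 1
--
--     if target_resolution < len(clean):
--         return "Invalid target resolution"
--
--     # If target resolution equals current resolution, return itself
--     if target_resolution == len(clean):
--         return [pin]
--
--     # If target resolution is only 1 level higher, generate direct children
--     if target_resolution == len(clean) + 1:
--         children = []
--         for char in [
--             "F",
--             "C",
--             "9",
--             "8",
--             "J",
--             "3",
--             "2",
--             "7",
--             "K",
--             "4",
--             "5",
--             "6",
--             "L",
--             "M",
--             "P",
--             "T",
--         ]:
--             child_clean = clean + char
--
--             # Add dashes after 3rd and 6th characters
--             child_with_dashes = ""
--             for i, c in enumerate(child_clean):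
--                 child_with_dashes += c
--                 if (i == 2 and len(child_clean) > 3) or (
--                     i == 5 and len(child_clean) > 6
--                 ):
--                     child_with_dashes += "-"
--
--             children.append(child_with_dashes)
--         return children
--
--     # If target resolution is more than 1 level higher, recursively generate children
--     all_children = []
--     direct_children = digipin_children(pin, len(clean) + 1)
--     if isinstance(direct_children, list):
--         for child in direct_children:
--             child_children = digipin_children(child, target_resolution)
--             if isinstance(child_children, list):
--                 all_children.extend(child_children)
--             else:
--                 all_children.append(child)
--     return all_children
-- ===== SOURCE B (Python) =====
-- import itertools
--
-- ALPHABET = "FC98J327K456LMPT"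
--
-- def _with_dashes(full):
--     if len(full) > 6:
--         return full[:3] + "-" + full[3:6] + "-" + full[6:]
--     if len(full) > 3:
--         return full[:3] + "-" + full[3:]
--     return full
--
-- def digipin_children(pin, target_resolution=None):
--     clean = pin.replace("-", "")
--     if len(clean) < 1:
--         return "Invalid DIGIPIN"
--     if target_resolution is None:
--         target_resolution = len(clean) + 1
--     if target_resolution < len(clean):
--         return "Invalid target resolution"
--     n = target_resolution - len(clean)
--     if n == 0:
--         return [pin]
--     return [_with_dashes(clean + "".join(combo))
--             for combo in itertools.product(ALPHABET, repeat=n)]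
-- ===== Notes on version B (the rewrite author's own statement) =====
-- stated objective: simpler
-- what changed: Replaces A's level-by-level recursion (format each intermediate child, strip its dashes, re-recurse) with a single flat enumeration of all n-character suffixes via itertools.product in the same 16-char order, formatting dashes once per final code.
-- outside the precondition, e.g. on digipin_children('', None): A returns 'Invalid DIGIPIN', B returns 'Invalid DIGIPIN'; on digipin_children('F3K', 2): A returns 'Invalid target resolution', B returns 'Invalid target resolution'
import Mathlib
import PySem

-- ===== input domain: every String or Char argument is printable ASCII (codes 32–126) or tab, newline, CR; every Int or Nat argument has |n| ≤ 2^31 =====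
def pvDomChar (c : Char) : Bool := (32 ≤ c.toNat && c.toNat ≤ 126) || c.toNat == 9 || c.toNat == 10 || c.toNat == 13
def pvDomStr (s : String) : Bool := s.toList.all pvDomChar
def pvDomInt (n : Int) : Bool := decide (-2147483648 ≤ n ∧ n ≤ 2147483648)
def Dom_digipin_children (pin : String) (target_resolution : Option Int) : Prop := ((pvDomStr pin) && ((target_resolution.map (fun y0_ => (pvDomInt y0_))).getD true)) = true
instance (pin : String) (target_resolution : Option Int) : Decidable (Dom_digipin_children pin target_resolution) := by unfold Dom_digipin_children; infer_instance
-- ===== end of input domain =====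

-- B replaces A's level-by-level recursion (format each intermediate child, strip its
-- dashes, recurse) by one flat enumeration of all n-character suffixes (itertools.product
-- in the same 16-char order) with a single dash-formatting step per result: simpler.
-- Both ports work on the return value only; neither Python mutates its arguments.

-- ===== PORT A =====

-- the 16 DIGIPIN characters, in A's literal order
def pvAlphabet : List Char := ['F', 'C', '9', '8', 'J', '3', '2', '7', 'K', '4', '5', '6', 'L', 'M', 'P', 'T']

-- A's inner loop: `for i, c in enumerate(child_clean): child_with_dashes += c; if …: += '-'`
def pvFmtA (cs : List Char) : List Char :=
  (PySem.List.enumerate cs).foldl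
    (fun acc ic =>
      acc ++ ([ic.2] ++ (if (ic.1 = 2 ∧ cs.length > 3) ∨ (ic.1 = 5 ∧ cs.length > 6) then ['-'] else []))) []

-- A's recursion, indexed by gap = target_resolution - len(clean) (A's own termination
-- measure; gap ≥ 1 at every call, the 0 case is unreachable).  gap = 1 is A's direct-children
-- loop; gap ≥ 2 is A's recursive branch: direct children (themselves a gap-1 call on the same
-- clean), then for each formatted child strip its dashes and recurse one level deeper.
def pvRecA (clean : List Char) (gap : Nat) : List String :=
  match gap with
  | 0 => []
  | 1 => pvAlphabet.foldl (fun children ch => children ++ [String.ofList (pvFmtA (clean ++ [ch]))]) []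
  | Nat.succ (Nat.succ g) =>
      let direct := pvRecA clean 1
      direct.foldl (fun all child => all ++ pvRecA (child.toList.filter (fun c => c != '-')) (g + 1)) []
termination_by gap

def digipin_children (pin : String) (target_resolution : Option Int) : List String :=
  -- pin.replace("-", "") : removing every '-' is exactly a filter
  let clean := pin.toList.filter (fun c => c != '-')
  if clean.length < 1 then []  -- A returns the string "Invalid DIGIPIN" (not a list): outside Pre_
  else
    let target : Int := target_resolution.getD ((clean.length : Int) + 1)
    if target < (clean.length : Int) then []  -- A returns "Invalid target resolution": outside Pre_
    else if target = (clean.length : Int) then [pin]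
    else pvRecA clean (target - (clean.length : Int)).toNat

-- ===== PORT B =====

-- B's `_with_dashes`: slice-and-join (slices with nonnegative bounds = take/drop, exact)
def pvFmtB (full : List Char) : List Char :=
  if full.length > 6 then full.take 3 ++ ['-'] ++ ((full.drop 3).take 3) ++ ['-'] ++ full.drop 6
  else if full.length > 3 then full.take 3 ++ ['-'] ++ full.drop 3
  else full

-- itertools.product(ALPHABET, repeat=n): leftmost position varies slowest
def pvCombos : Nat → List (List Char)
  | 0 => [[]]
  | n + 1 => pvAlphabet.flatMap (fun c => (pvCombos n).map (fun t => c :: t))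

def digipin_children_alt (pin : String) (target_resolution : Option Int) : List String :=
  let clean := pin.toList.filter (fun c => c != '-')
  if clean.length < 1 then []  -- "Invalid DIGIPIN": outside Pre_
  else
    let target : Int := target_resolution.getD ((clean.length : Int) + 1)
    if target < (clean.length : Int) then []  -- "Invalid target resolution": outside Pre_
    else
      let n := (target - (clean.length : Int)).toNat
      if n = 0 then [pin]
      else (pvCombos n).map (fun combo => String.ofList (pvFmtB (clean ++ combo)))

-- ===== PRECONDITION & SPEC =====
-- Pre_ excludes exactly the inputs on which A returns an error STRING instead of a list
-- (empty cleaned pin, or target resolution below the current one): not a value of List String.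
def Pre_digipin_children (pin : String) (target_resolution : Option Int) : Prop :=
  1 ≤ (pin.toList.filter (fun c => c != '-')).length ∧
  ((pin.toList.filter (fun c => c != '-')).length : Int) ≤
    target_resolution.getD (((pin.toList.filter (fun c => c != '-')).length : Int) + 1)
instance (pin : String) (target_resolution : Option Int) : Decidable (Pre_digipin_children pin target_resolution) := by unfold Pre_digipin_children; infer_instance

def pvWitness_digipin_children : String × Option Int := ("F3K", some 4)

def Spec_digipin_children (pin : String) (target_resolution : Option Int) (out : List String) : Prop := out = digipin_children_alt pin target_resolution
instance (pin : String) (target_resolution : Option Int) (out : List String) : Decidable (Spec_digipin_children pin target_resolution out) := by unfold Spec_digipin_children; infer_instance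

-- ===== CLAIM (what is proved, stated in full; the proofs are below) =====
def Claim_equal_digipin_children : Prop := ∀ (pin : String) (target_resolution : Option Int), Dom_digipin_children pin target_resolution → Pre_digipin_children pin target_resolution → Spec_digipin_children pin target_resolution (digipin_children pin target_resolution)

-- ===== LEMMAS AND PROOFS =====

theorem pv_witness_ok : Dom_digipin_children pvWitness_digipin_children.1 pvWitness_digipin_children.2 ∧ Pre_digipin_children pvWitness_digipin_children.1 pvWitness_digipin_children.2 := by
  constructor <;> decide

theorem pv_flatMap_single {a b : Type} (l : List a) (f : a → b) :
    l.flatMap (fun x => [f x]) = l.map f := by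
  induction l <;> simp_all

-- the formatting loop in flatMap form
theorem pvFmtA_eq_flatMap (cs : List Char) :
    pvFmtA cs = (PySem.List.enumerate cs).flatMap
      (fun ic => [ic.2] ++ (if (ic.1 = 2 ∧ cs.length > 3) ∨ (ic.1 = 5 ∧ cs.length > 6) then ['-'] else [])) := by
  unfold pvFmtA
  rw [PySem.List.foldl_append_eq_flatMap]
  simp

-- stripping the dashes back off a formatted code recovers the clean code
theorem filter_pvFmtA (cs : List Char) (h : ∀ x ∈ cs, x ≠ '-') :
    (pvFmtA cs).filter (fun c => c != '-') = cs := by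
  rw [pvFmtA_eq_flatMap, List.filter_flatMap]
  have hpt : ∀ ic ∈ PySem.List.enumerate cs,
      (([ic.2] ++ (if (ic.1 = 2 ∧ cs.length > 3) ∨ (ic.1 = 5 ∧ cs.length > 6) then ['-'] else [])).filter (fun c => c != '-')) = [ic.2] := by
    intro ic hic
    have hmem : ic.2 ∈ cs := by
      rcases (PySem.List.mem_enumerate_iff cs 0 ic).1 hic with ⟨k, hk, rfl⟩
      simp
    have hne : ic.2 ≠ '-' := h _ hmem
    split <;> simp [hne]
  rw [List.flatMap_congr hpt, pv_flatMap_single]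
  exact PySem.List.map_snd_enumerate cs 0

-- past index 5 the loop only copies characters
theorem pvFmt_tail (t : List Char) (s : Int) (hs : 6 ≤ s) :
    (PySem.List.enumerate t s).flatMap
      (fun ic => ic.2 :: if ic.1 = 2 ∨ ic.1 = 5 then ['-'] else []) = t := by
  induction t generalizing s with
  | nil => simp [PySem.List.enumerate_nil]
  | cons a t ih =>
      rw [PySem.List.enumerate_cons, List.flatMap_cons, ih (s + 1) (by omega)]
      have h2 : ¬ (s = 2 ∨ s = 5) := by rintro (rfl | rfl) <;> omega
      simp [h2]

-- the two dash-formatting rules agree on every string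
theorem pvFmtA_eq_pvFmtB (cs : List Char) : pvFmtA cs = pvFmtB cs := by
  rw [pvFmtA_eq_flatMap]
  rcases cs with _ | ⟨a, _ | ⟨b, _ | ⟨c, _ | ⟨d, _ | ⟨e, _ | ⟨f, _ | ⟨g, t⟩⟩⟩⟩⟩⟩⟩
  · simp [pvFmtB, PySem.List.enumerate_nil]
  · simp [pvFmtB, PySem.List.enumerate_cons, PySem.List.enumerate_nil]
  · simp [pvFmtB, PySem.List.enumerate_cons, PySem.List.enumerate_nil]
  · simp [pvFmtB, PySem.List.enumerate_cons, PySem.List.enumerate_nil]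
  · simp [pvFmtB, PySem.List.enumerate_cons, PySem.List.enumerate_nil]
  · simp [pvFmtB, PySem.List.enumerate_cons, PySem.List.enumerate_nil]
  · simp [pvFmtB, PySem.List.enumerate_cons, PySem.List.enumerate_nil]
  · simp [pvFmtB, PySem.List.enumerate_cons]
    exact pvFmt_tail t 7 (by norm_num)

-- the direct-children loop is a map over the alphabet
theorem pvRecA_one (clean : List Char) :
    pvRecA clean 1 = pvAlphabet.map (fun c => String.ofList (pvFmtA (clean ++ [c]))) := by
  unfold pvRecA
  rw [PySem.List.foldl_append_singleton_eq_map]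
  simp

theorem alphabet_no_dash : ∀ c ∈ pvAlphabet, c ≠ '-' := by
  intro c hc
  fin_cases hc <;> decide

-- A's recursion enumerates exactly the Cartesian product, depth-first
theorem pvRecA_eq_combos (g : Nat) : ∀ (clean : List Char), (∀ x ∈ clean, x ≠ '-') →
    pvRecA clean (g + 1) = (pvCombos (g + 1)).map (fun suf => String.ofList (pvFmtA (clean ++ suf))) := by
  induction g with
  | zero =>
      intro clean _
      rw [pvRecA_one]
      show _ = (pvAlphabet.flatMap (fun c => ([[]] : List (List Char)).map (fun t => c :: t))).map _
      simp only [List.map_cons, List.map_nil]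
      rw [pv_flatMap_single, List.map_map]
      rfl
  | succ g ih =>
      intro clean hclean
      show pvRecA clean (g + 1 + 1) = _
      unfold pvRecA
      rw [PySem.List.foldl_append_eq_flatMap, List.nil_append, pvRecA_one,
          List.flatMap_map]
      have lhs_eq : ∀ c ∈ pvAlphabet,
          pvRecA ((String.ofList (pvFmtA (clean ++ [c]))).toList.filter (fun x => x != '-')) (g + 1)
            = (pvCombos (g + 1)).map (fun suf => String.ofList (pvFmtA (clean ++ [c] ++ suf))) := by
        intro c hc
        have hcln : ∀ x ∈ clean ++ [c], x ≠ '-' := by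
          intro x hx
          rcases List.mem_append.1 hx with hx | hx
          · exact hclean x hx
          · simp only [List.mem_singleton] at hx; rw [hx]; exact alphabet_no_dash c hc
        rw [show (String.ofList (pvFmtA (clean ++ [c]))).toList = pvFmtA (clean ++ [c]) by simp,
            filter_pvFmtA _ hcln]
        exact ih (clean ++ [c]) hcln
      rw [List.flatMap_congr lhs_eq]
      show _ = (pvAlphabet.flatMap (fun c => (pvCombos (g + 1)).map (fun t => c :: t))).map _
      rw [List.map_flatMap]
      apply List.flatMap_congr
      intro c _
      rw [List.map_map]
      apply List.map_congr_left
      intro suf _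
      simp [List.append_assoc]

-- ===== VERDICT (by name: the statement is the Claim_ definition above) =====
theorem digipin_children_spec : Claim_equal_digipin_children := by
  intro pin tr _ hpre
  obtain ⟨h1, h2⟩ := hpre
  unfold Spec_digipin_children digipin_children digipin_children_alt
  set clean := pin.toList.filter (fun c => c != '-') with hcleandef
  have hne : ¬ clean.length < 1 := by omega
  have hnlt : ¬ tr.getD ((clean.length : Int) + 1) < (clean.length : Int) := by omega
  simp only [hne, hnlt, if_false]
  set target := tr.getD ((clean.length : Int) + 1) with htd
  by_cases heq : target = (clean.length : Int)
  · simp [heq]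
  · obtain ⟨g, hg⟩ : ∃ g, (target - (clean.length : Int)).toNat = g + 1 := by
      have hgt : (clean.length : Int) < target := lt_of_le_of_ne h2 (fun h => heq h.symm)
      exact ⟨(target - (clean.length : Int)).toNat - 1, by omega⟩
    have hcln : ∀ x ∈ clean, x ≠ '-' := by
      intro x hx
      rw [hcleandef] at hx
      simpa using (List.of_mem_filter hx)
    simp only [heq, if_false, hg, Nat.succ_ne_zero]
    rw [pvRecA_eq_combos g clean hcln]
    simp [pvFmtA_eq_pvFmtB]
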